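-- pv_equiv track=rewrite | github.com/P1X3R/alpha-minus-one | decode_move.py | _encode_queen_like_moves
-- ===== SOURCE A (Python) =====
-- def _encode_queen_like_moves(rank_offset: int, file_offset: int) -> int:
--     """
--     Encodes the relative rank and file offsets of a queen-like move (straight or diagonal)
--     into its corresponding integer layer (0-55).
--
--     Args:
--         rank_offset (int): The difference in rank between the destination and starting square.
--         file_offset (int): The difference in file between the destination and starting square.
--
--     Returns:
--         int: The integer layer for the queen-like move.
--     """
--     QUEEN_DIRECTIONS = [
--         (1, 0),  # North
--         (1, 1),  # North-East
--         (0, 1),  # East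
--         (-1, 1),  # South-East
--         (-1, 0),  # South
--         (-1, -1),  # South-West
--         (0, -1),  # West
--         (1, -1),  # North-West
--     ]
--     MAX_QUEEN_DISTANCE = 7
--
--     # Determine direction index
--     direction_idx = -1
--     # Normalize dr, df to get the direction vector (e.g., (1,0) for North)
--     # This handles moves of different distances in the same direction.
--     norm_dr = 0 if rank_offset == 0 else rank_offset // abs(rank_offset)
--     norm_df = 0 if file_offset == 0 else file_offset // abs(file_offset)
--
--     for i, (dir_r, dir_f) in enumerate(QUEEN_DIRECTIONS):
--         if norm_dr == dir_r and norm_df == dir_f: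
--             direction_idx = i
--             break
--
--     if direction_idx == -1:
--         raise ValueError(f"Could not determine direction for offsets: ({rank_offset}, {file_offset})")
--
--     # Determine distance
--     # For straight moves (rank_offset=0 or file_offset=0), distance is abs(rank_offset) or abs(file_offset)
--     # For diagonal moves, distance is abs(rank_offset) (which is equal to abs(file_offset))
--     distance = max(abs(rank_offset), abs(file_offset))
--
--     if not (1 <= distance <= MAX_QUEEN_DISTANCE):
--         raise ValueError(f"Invalid distance {distance} for queen-like move with offsets: ({rank_offset}, {file_offset})")
--
--
--     # Queen-style layers are 0-55
--     # Layer = (direction_idx * MAX_QUEEN_DISTANCE) + (distance - 1)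
--     # Example: Direction N (idx 0), distance 1 -> layer 0 (0*7 + 0)
--     #          Direction N (idx 0), distance 7 -> layer 6 (0*7 + 6)
--     #          Direction NE (idx 1), distance 1 -> layer 7 (1*7 + 0)
--     #          Direction NW (idx 7), distance 7 -> layer 7*7 + 6 = 55
--     return (direction_idx * MAX_QUEEN_DISTANCE) + (distance - 1)
-- ===== SOURCE B (Python) =====
-- def _encode_queen_like_moves(rank_offset: int, file_offset: int) -> int:
--     distance = max(abs(rank_offset), abs(file_offset))
--     if not 1 <= distance <= 7:
--         raise ValueError(
--             f"Invalid distance {distance} for queen-like move with offsets: ({rank_offset}, {file_offset})"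
--         )
--     s_r = (rank_offset > 0) - (rank_offset < 0)
--     s_f = (file_offset > 0) - (file_offset < 0)
--     # clockwise N,NE,E,SE,S,SW,W,NW as a closed form over the two signs
--     direction_idx = 6 + s_r if s_f < 0 else 2 - s_r * (2 - s_f)
--     return direction_idx * 7 + distance - 1
-- ===== Notes on version B (the rewrite author's own statement) =====
-- stated objective: simpler
-- what changed: Replaces the enumerate-scan over the 8-direction list (plus the direction-not-found branch) by a closed-form arithmetic formula over the two offset signs, with the distance range check done first so the zero-offset input is still rejected.
-- outside the precondition, e.g. on _encode_queen_like_moves(0, 0): A raises ValueError, B raises ValueError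
import Mathlib
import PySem

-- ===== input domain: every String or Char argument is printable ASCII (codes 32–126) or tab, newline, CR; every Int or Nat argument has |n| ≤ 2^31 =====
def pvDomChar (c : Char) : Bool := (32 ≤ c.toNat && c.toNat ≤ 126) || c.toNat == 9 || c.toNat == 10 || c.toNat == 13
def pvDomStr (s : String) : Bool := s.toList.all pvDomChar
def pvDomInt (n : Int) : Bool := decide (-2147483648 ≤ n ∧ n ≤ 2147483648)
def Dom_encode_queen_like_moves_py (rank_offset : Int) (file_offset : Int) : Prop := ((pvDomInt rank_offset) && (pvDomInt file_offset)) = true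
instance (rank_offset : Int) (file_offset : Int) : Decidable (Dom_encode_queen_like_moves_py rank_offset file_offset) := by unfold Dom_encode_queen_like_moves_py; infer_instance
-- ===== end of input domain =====

-- B replaces A's enumerate-scan over the 8-direction list by a closed-form arithmetic
-- formula over the two offset signs (objective: simpler).

-- ===== PORT A =====
-- the QUEEN_DIRECTIONS list literal
def pvQueenDirs : List (Int × Int) :=
  [(1, 0), (1, 1), (0, 1), (-1, 1), (-1, 0), (-1, -1), (0, -1), (1, -1)]

-- the 'for i, (dir_r, dir_f) in enumerate(...): if …: direction_idx = i; break' loop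
-- (direction_idx stays -1 when no entry matches)
def pvFindDir (nr nf : Int) : List (Int × Int) → Int → Int
  | [], _ => -1
  | (dr, df) :: rest, i => if nr = dr ∧ nf = df then i else pvFindDir nr nf rest (i + 1)

-- where the Python raises ValueError the port returns 0; those inputs are outside Pre_
def encode_queen_like_moves_py (rank_offset : Int) (file_offset : Int) : Int :=
  let norm_dr : Int := if rank_offset = 0 then 0 else PySem.Int.floordiv rank_offset |rank_offset|
  let norm_df : Int := if file_offset = 0 then 0 else PySem.Int.floordiv file_offset |file_offset|
  let direction_idx := pvFindDir norm_dr norm_df pvQueenDirs 0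
  if direction_idx = -1 then 0
  else
    let distance := max |rank_offset| |file_offset|
    if ¬(1 ≤ distance ∧ distance ≤ 7) then 0
    else direction_idx * 7 + (distance - 1)

-- ===== PORT B =====
def encode_queen_like_moves_py_alt (rank_offset : Int) (file_offset : Int) : Int :=
  let distance := max |rank_offset| |file_offset|
  if ¬(1 ≤ distance ∧ distance ≤ 7) then 0   -- ValueError in Python; outside Pre_
  else
    let s_r : Int := (if rank_offset > 0 then 1 else 0) - (if rank_offset < 0 then 1 else 0)
    let s_f : Int := (if file_offset > 0 then 1 else 0) - (if file_offset < 0 then 1 else 0)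
    let direction_idx := if s_f < 0 then 6 + s_r else 2 - s_r * (2 - s_f)
    direction_idx * 7 + distance - 1

-- ===== PRECONDITION & SPEC =====
-- Pre_ excludes exactly the inputs where A raises ValueError:
-- distance = max(|dr|,|df|) outside 1..7 (this includes (0,0), where A's direction scan fails).
def Pre_encode_queen_like_moves_py (rank_offset : Int) (file_offset : Int) : Prop :=
  1 ≤ max |rank_offset| |file_offset| ∧ max |rank_offset| |file_offset| ≤ 7
instance (rank_offset : Int) (file_offset : Int) : Decidable (Pre_encode_queen_like_moves_py rank_offset file_offset) := by unfold Pre_encode_queen_like_moves_py; infer_instance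

def pvWitness_encode_queen_like_moves_py : Int × Int := (2, -2)

def Spec_encode_queen_like_moves_py (rank_offset : Int) (file_offset : Int) (out : Int) : Prop := out = encode_queen_like_moves_py_alt rank_offset file_offset
instance (rank_offset : Int) (file_offset : Int) (out : Int) : Decidable (Spec_encode_queen_like_moves_py rank_offset file_offset out) := by unfold Spec_encode_queen_like_moves_py; infer_instance

-- ===== CLAIM (what is proved, stated in full; the proofs are below) =====
def Claim_equal_encode_queen_like_moves_py : Prop := ∀ (rank_offset : Int) (file_offset : Int), Dom_encode_queen_like_moves_py rank_offset file_offset → Pre_encode_queen_like_moves_py rank_offset file_offset → Spec_encode_queen_like_moves_py rank_offset file_offset (encode_queen_like_moves_py rank_offset file_offset)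

-- ===== LEMMAS AND PROOFS =====

-- ===== VERDICT (by name: the statement is the Claim_ definition above) =====
theorem encode_queen_like_moves_py_spec : Claim_equal_encode_queen_like_moves_py := by
  intro r f _ hpre
  obtain ⟨h1, h2⟩ := hpre
  have hr : -7 ≤ r ∧ r ≤ 7 := by
    have := le_max_left |r| |f|
    rcases abs_cases r with ⟨e, _⟩ | ⟨e, _⟩ <;> rcases abs_cases f with ⟨e2, _⟩ | ⟨e2, _⟩ <;> omega
  have hf : -7 ≤ f ∧ f ≤ 7 := by
    have := le_max_right |r| |f|
    rcases abs_cases r with ⟨e, _⟩ | ⟨e, _⟩ <;> rcases abs_cases f with ⟨e2, _⟩ | ⟨e2, _⟩ <;> omega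
  obtain ⟨hr1, hr2⟩ := hr
  obtain ⟨hf1, hf2⟩ := hf
  unfold Spec_encode_queen_like_moves_py
  interval_cases r <;> interval_cases f <;> rfl
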